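-- pv_equiv track=rewrite | github.com/jxman/aws-ssm-data-fetcher | lambda_functions/report_generator/lambda_function.py | _generate_service_matrix
-- ===== SOURCE A (Python) =====
-- from typing import Any, Dict, List
--
-- def _generate_service_matrix(data: List[Dict]) -> List[Dict]:
--     """Generate service availability matrix (✓/✗ for each service-region combination)."""
--     if not data or "Service Name" not in data[0] or "Region Code" not in data[0]:
--         return [{"Service": "No data available"}]
--
--     # Get unique services and regions
--     services = sorted(list(set(row["Service Name"] for row in data)))
--     regions = sorted(list(set(row["Region Code"] for row in data)))
--
--     # Create service-region mapping
--     service_regions_map = {}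
--     for row in data:
--         service = row["Service Name"]
--         region = row["Region Code"]
--         if service not in service_regions_map:
--             service_regions_map[service] = set()
--         service_regions_map[service].add(region)
--
--     # Create matrix
--     matrix_data = []
--     for service in services:
--         row = {"Service": service}
--         service_regions = service_regions_map.get(service, set())
--
--         for region in regions:
--             row[region] = "✓" if region in service_regions else "✗"
--
--         matrix_data.append(row)
--
--     return matrix_data
-- ===== SOURCE B (Python) =====
-- from typing import Any, Dict, List
--
-- def _generate_service_matrix(data: List[Dict]) -> List[Dict]:
--     """Sort-and-merge variant: sort the distinct (service, region) pairs once,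
--     walk them in one pass grouping by service, and build each row by a
--     two-pointer merge of the group's sorted regions against the sorted region
--     list -- no per-service set index and no per-cell membership test."""
--     if not data or "Service Name" not in data[0] or "Region Code" not in data[0]:
--         return [{"Service": "No data available"}]
--
--     pairs = sorted(set((row["Service Name"], row["Region Code"]) for row in data))
--     regions = sorted(set(r for _, r in pairs))
--
--     matrix = []
--     i = 0
--     n = len(pairs)
--     while i < n:
--         service = pairs[i][0]
--         j = i
--         while j < n and pairs[j][0] == service:
--             j += 1
--         have = [r for _, r in pairs[i:j]]  # this service's regions, already sorted
--         row = {"Service": service}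
--         k = 0
--         for region in regions:
--             if k < len(have) and have[k] == region:
--                 row[region] = "✓"
--                 k += 1
--             else:
--                 row[region] = "✗"
--         matrix.append(row)
--         i = j
--     return matrix
-- ===== Notes on version B (the rewrite author's own statement) =====
-- stated objective: alternative
-- what changed: Replaces A's dict-of-sets index with per-cell set-membership tests by a sort-and-merge: the distinct (service, region) pairs are sorted once, grouped by service in a single pass, and each row is produced by a two-pointer merge of the group's sorted regions against the sorted region list.
import Mathlib
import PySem

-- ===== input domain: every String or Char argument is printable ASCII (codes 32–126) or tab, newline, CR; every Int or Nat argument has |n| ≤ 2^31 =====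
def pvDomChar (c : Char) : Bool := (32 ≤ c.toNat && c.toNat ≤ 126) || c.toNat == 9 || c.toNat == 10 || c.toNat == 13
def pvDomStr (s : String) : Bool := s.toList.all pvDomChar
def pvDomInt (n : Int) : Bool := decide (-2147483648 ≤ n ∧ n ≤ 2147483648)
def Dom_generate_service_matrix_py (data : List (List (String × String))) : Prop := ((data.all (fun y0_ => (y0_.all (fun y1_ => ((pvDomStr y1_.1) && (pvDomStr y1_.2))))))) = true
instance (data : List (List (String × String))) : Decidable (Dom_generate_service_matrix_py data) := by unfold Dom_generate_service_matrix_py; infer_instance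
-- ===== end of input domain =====

-- B replaces A's dict-of-sets index and per-cell membership tests by a sort-and-merge:
-- the distinct (service, region) pairs are sorted once, grouped by service in one pass,
-- and each row is a two-pointer merge of the group's regions against the region list;
-- objective: alternative algorithm, similar cost.

-- ===== PORT A =====
-- shared helpers: both Pythons read row[k] (first match) and test key presence.
def pvRowGet (row : List (String × String)) (k : String) : String :=
  ((PySem.Dict.mk row).get? k).getD ""

def pvHasKey (row : List (String × String)) (k : String) : Bool :=
  (PySem.Dict.mk row).contains k

def pvServices (data : List (List (String × String))) : List String :=
  PySem.List.sorted (PySem.Set.ofList (data.map (fun row => pvRowGet row "Service Name"))) (fun x => x)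

def pvRegions (data : List (List (String × String))) : List String :=
  PySem.List.sorted (PySem.Set.ofList (data.map (fun row => pvRowGet row "Region Code"))) (fun x => x)

def generate_service_matrix_py (data : List (List (String × String))) : List (List (String × String)) :=
  match data with
  | [] => [[("Service", "No data available")]]
  | first :: _ =>
    if !pvHasKey first "Service Name" || !pvHasKey first "Region Code" then
      [[("Service", "No data available")]]
    else
      let services := pvServices data
      let regions := pvRegions data
      let srmap : PySem.Dict String (PySem.Set String) :=
        data.foldl (fun m row =>
          let s := pvRowGet row "Service Name"
          let r := pvRowGet row "Region Code"
          let m := if m.contains s then m else m.insert s PySem.Set.empty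
          m.insert s (PySem.Set.add (m.getD s PySem.Set.empty) r)) PySem.Dict.empty
      services.foldl (fun acc s =>
        let row :=
          regions.foldl (fun row r =>
              row.insert r (if PySem.Set.contains (srmap.getD s PySem.Set.empty) r then "✓" else "✗"))
            (PySem.Dict.mk [("Service", s)])
        acc ++ [row.items]) []

-- ===== PORT B =====
-- row ↦ (row["Service Name"], row["Region Code"])
def pvPairFun (row : List (String × String)) : String × String :=
  (pvRowGet row "Service Name", pvRowGet row "Region Code")

-- pairs = sorted(set(...)): Python sorts tuples lexicographically = sorted2 with keys fst, snd
def pvPairs (data : List (List (String × String))) : List (String × String) :=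
  PySem.List.sorted2 (PySem.Set.ofList (data.map pvPairFun)) Prod.fst Prod.snd

-- regions = sorted(set(r for _, r in pairs))
def pvRegionsB (pairs : List (String × String)) : List String :=
  PySem.List.sorted (PySem.Set.ofList (pairs.map Prod.snd)) (fun x => x)

-- the outer while-loop: scan the sorted pairs once, grouping the run of one service
def pvGroup : List (String × String) → List (String × List String)
  | [] => []
  | (s, r) :: rest =>
    (s, r :: (rest.takeWhile (fun p => p.1 == s)).map Prod.snd)
      :: pvGroup (rest.dropWhile (fun p => p.1 == s))
termination_by l => l.length
decreasing_by
  simpa using Nat.lt_succ_of_le (List.Sublist.length_le (List.dropWhile_sublist _))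

-- the inner for-loop: two-pointer merge of `have` (pointer k) against `regions`
def pvFillRow : List String → List String → PySem.Dict String String → PySem.Dict String String
  | [], _, row => row
  | r :: rs, hv, row =>
    match hv with
    | h :: hs =>
      if h = r then pvFillRow rs hs (row.insert r "✓")
      else pvFillRow rs (h :: hs) (row.insert r "✗")
    | [] => pvFillRow rs [] (row.insert r "✗")

def generate_service_matrix_py_alt (data : List (List (String × String))) : List (List (String × String)) :=
  match data with
  | [] => [[("Service", "No data available")]]
  | first :: _ =>
    if !pvHasKey first "Service Name" || !pvHasKey first "Region Code" then
      [[("Service", "No data available")]]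
    else
      let pairs := pvPairs data
      let regions := pvRegionsB pairs
      (pvGroup pairs).map (fun g => (pvFillRow regions g.2 (PySem.Dict.mk [("Service", g.1)])).items)

-- ===== PRECONDITION & SPEC =====
-- Pre_ excludes exactly the inputs on which Python A raises KeyError (B raises there too):
-- a non-empty data whose first row has both keys but some row is missing one of them.
def Pre_generate_service_matrix_py (data : List (List (String × String))) : Prop :=
  (match data with
   | [] => true
   | first :: _ =>
     !(pvHasKey first "Service Name" && pvHasKey first "Region Code")
       || data.all (fun row => pvHasKey row "Service Name" && pvHasKey row "Region Code")) = true

instance (data : List (List (String × String))) : Decidable (Pre_generate_service_matrix_py data) := by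
  unfold Pre_generate_service_matrix_py; infer_instance

def pvWitness_generate_service_matrix_py : (List (List (String × String))) :=
  [[("Service Name", "ec2"), ("Region Code", "us-east-1")]]

def Spec_generate_service_matrix_py (data : List (List (String × String))) (out : List (List (String × String))) : Prop := out = generate_service_matrix_py_alt data
instance (data : List (List (String × String))) (out : List (List (String × String))) : Decidable (Spec_generate_service_matrix_py data out) := by unfold Spec_generate_service_matrix_py; infer_instance

-- ===== CLAIM (what is proved, stated in full; the proofs are below) =====
def Claim_equal_generate_service_matrix_py : Prop := ∀ (data : List (List (String × String))), Dom_generate_service_matrix_py data → Pre_generate_service_matrix_py data → Spec_generate_service_matrix_py data (generate_service_matrix_py data)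

-- ===== LEMMAS AND PROOFS =====

-- sorted2's comparison for keys fst, snd (Python's lexicographic tuple "<", as a Bool)
def pvBlt (a b : String × String) : Bool :=
  decide (a.1 < b.1) || (!decide (b.1 < a.1) && decide (a.2 < b.2))

-- lexicographic order on pairs of strings, as a Prop
def pvLexLt (a b : String × String) : Prop :=
  a.1 < b.1 ∨ (a.1 = b.1 ∧ a.2 < b.2)

theorem pvBlt_iff (a b : String × String) : pvBlt a b = true ↔ pvLexLt a b := by
  rcases lt_trichotomy a.1 b.1 with h | h | h
  · simp [pvBlt, pvLexLt, h, asymm h]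
  · simp [pvBlt, pvLexLt, h]
  · simp [pvBlt, pvLexLt, h, asymm h, ne_of_gt h]

theorem pvLexLt_trans {a b c : String × String} (h1 : pvLexLt a b) (h2 : pvLexLt b c) : pvLexLt a c := by
  rcases h1 with h1 | ⟨e1, h1⟩ <;> rcases h2 with h2 | ⟨e2, h2⟩
  · exact Or.inl (lt_trans h1 h2)
  · exact Or.inl (e2 ▸ h1)
  · exact Or.inl (e1 ▸ h2)
  · exact Or.inr ⟨e1.trans e2, lt_trans h1 h2⟩

theorem pvLexLt_irrefl (a : String × String) : ¬ pvLexLt a a := by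
  rintro (h | ⟨_, h⟩) <;> exact lt_irrefl _ h

theorem pvLexLt_of_not_of_ne {a b : String × String} (h : ¬ pvLexLt b a) (hne : a ≠ b) : pvLexLt a b := by
  rcases lt_trichotomy a.1 b.1 with h1 | h1 | h1
  · exact Or.inl h1
  · rcases lt_trichotomy a.2 b.2 with h2 | h2 | h2
    · exact Or.inr ⟨h1, h2⟩
    · exact absurd (Prod.ext h1 h2) hne
    · exact absurd (Or.inr ⟨h1.symm, h2⟩) h
  · exact absurd (Or.inl h1) h

-- insertBy with pvBlt preserves "no inversions"
theorem pvInsertBy_nogt (x : String × String) (ys : List (String × String))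
    (h : ys.Pairwise (fun a b => ¬ pvLexLt b a)) :
    (PySem.List.insertBy pvBlt x ys).Pairwise (fun a b => ¬ pvLexLt b a) := by
  induction ys with
  | nil => simp [PySem.List.insertBy.eq_1]
  | cons y ys ih =>
    obtain ⟨hy, hys⟩ := List.pairwise_cons.mp h
    rw [PySem.List.insertBy.eq_2]
    by_cases hb : pvBlt x y = true
    · rw [if_pos hb]
      have hxy : pvLexLt x y := (pvBlt_iff _ _).mp hb
      refine List.Pairwise.cons ?_ (List.pairwise_cons.mpr ⟨hy, hys⟩)
      intro z hz hzx
      rcases List.mem_cons.mp hz with rfl | hz'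
      · exact pvLexLt_irrefl _ (pvLexLt_trans hzx hxy)
      · exact hy z hz' (pvLexLt_trans hzx hxy)
    · rw [if_neg hb]
      refine List.Pairwise.cons ?_ (ih hys)
      intro z hz
      rcases (PySem.List.insertBy_mem_iff _ _ _ _).mp hz with rfl | hz'
      · intro hzy
        exact absurd ((pvBlt_iff _ _).mpr hzy) (by simpa using hb)
      · exact hy z hz'

theorem pvFoldl_insertBy_nogt (l : List (String × String)) (acc : List (String × String))
    (h : acc.Pairwise (fun a b => ¬ pvLexLt b a)) :
    (l.foldl (fun acc x => PySem.List.insertBy pvBlt x acc) acc).Pairwise (fun a b => ¬ pvLexLt b a) := by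
  induction l generalizing acc with
  | nil => exact h
  | cons x l ih => exact ih _ (pvInsertBy_nogt x acc h)

theorem pvSorted2_eq_foldl (xs : List (String × String)) :
    PySem.List.sorted2 xs Prod.fst Prod.snd = xs.foldl (fun acc x => PySem.List.insertBy pvBlt x acc) [] := rfl

-- pairs = sorted(set of pairs) is strictly lexicographically increasing
theorem pvPairs_pairwise (data : List (List (String × String))) :
    (pvPairs data).Pairwise pvLexLt := by
  have hnd : (pvPairs data).Nodup :=
    ((PySem.List.sorted2_perm _ _ _ _).nodup_iff).mpr (PySem.Set.nodup_ofList _)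
  have hng : (pvPairs data).Pairwise (fun a b => ¬ pvLexLt b a) := by
    rw [pvPairs, pvSorted2_eq_foldl]
    exact pvFoldl_insertBy_nogt _ _ (List.Pairwise.nil)
  exact (hng.and hnd).imp (fun {a b} ⟨h1, h2⟩ => pvLexLt_of_not_of_ne h1 h2)

theorem pvPairs_mem (data : List (List (String × String))) (p : String × String) :
    p ∈ pvPairs data ↔ p ∈ data.map pvPairFun := by
  rw [pvPairs, (PySem.List.sorted2_perm _ _ _ _).mem_iff, PySem.Set.mem_ofList]

-- whether some data row carries the pair (service s, region r)
def pvHit (data : List (List (String × String))) (s r : String) : Bool :=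
  data.any (fun row => pvRowGet row "Service Name" == s && pvRowGet row "Region Code" == r)

theorem pvHit_cons (row : List (String × String)) (rest : List (List (String × String))) (s r : String) :
    pvHit (row :: rest) s r
      = ((pvRowGet row "Service Name" == s && pvRowGet row "Region Code" == r) || pvHit rest s r) := by
  simp [pvHit]

theorem pvHit_iff (data : List (List (String × String))) (s r : String) :
    pvHit data s r = true ↔ (s, r) ∈ data.map pvPairFun := by
  rw [pvHit, List.any_eq_true]
  simp only [List.mem_map, Bool.and_eq_true, beq_iff_eq]
  constructor
  · rintro ⟨row, hrow, h1, h2⟩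
    exact ⟨row, hrow, by simp [pvPairFun, h1, h2]⟩
  · rintro ⟨row, hrow, hrow2⟩
    obtain ⟨h1, h2⟩ := Prod.mk.injEq .. ▸ hrow2
    exact ⟨row, hrow, by simp [pvPairFun] at hrow2 ⊢; exact ⟨hrow2.1, hrow2.2⟩⟩

-- A-side: one step of building service_regions_map, seen through getD at s
theorem stepA_getD (m : PySem.Dict String (PySem.Set String)) (row : List (String × String)) (s : String) :
    ((let s' := pvRowGet row "Service Name"
      let r' := pvRowGet row "Region Code"
      let m' := if m.contains s' then m else m.insert s' PySem.Set.empty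
      m'.insert s' (PySem.Set.add (m'.getD s' PySem.Set.empty) r')).getD s PySem.Set.empty)
      = if s = pvRowGet row "Service Name"
          then PySem.Set.add (m.getD s PySem.Set.empty) (pvRowGet row "Region Code")
          else m.getD s PySem.Set.empty := by
  dsimp only
  by_cases hc : m.contains (pvRowGet row "Service Name") = true
  · simp only [if_pos hc, PySem.Dict.getD_insert]
    split <;> simp_all
  · have h0 : m.getD (pvRowGet row "Service Name") PySem.Set.empty = PySem.Set.empty := by
      unfold PySem.Dict.getD
      rw [(PySem.Dict.get?_eq_none_iff_contains m _).mpr (by simpa using hc)]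
      rfl
    simp only [if_neg hc, PySem.Dict.getD_insert, h0]
    split <;> simp_all

-- A-side: membership in service_regions_map[s] is pvHit
theorem srmap_getD_mem (data : List (List (String × String))) (m : PySem.Dict String (PySem.Set String)) (s r : String) :
    (r ∈ (data.foldl (fun m row =>
        let s' := pvRowGet row "Service Name"
        let r' := pvRowGet row "Region Code"
        let m' := if m.contains s' then m else m.insert s' PySem.Set.empty
        m'.insert s' (PySem.Set.add (m'.getD s' PySem.Set.empty) r')) m).getD s PySem.Set.empty)
      ↔ (r ∈ m.getD s PySem.Set.empty ∨ pvHit data s r = true) := by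
  induction data generalizing m with
  | nil => simp [pvHit]
  | cons row rest ih =>
    simp only [List.foldl_cons]
    rw [ih, stepA_getD, pvHit_cons]
    by_cases h : s = pvRowGet row "Service Name"
    · have h' : pvRowGet row "Service Name" = s := h.symm
      simp only [h', if_true, PySem.Set.mem_add, Bool.or_eq_true, Bool.and_eq_true, beq_iff_eq,
        beq_self_eq_true, true_and]
      constructor
      · rintro ((a | b) | c) <;> tauto
      · rintro (a | b | c) <;> tauto
    · have h' : ¬ (pvRowGet row "Service Name" = s) := fun he => h he.symm
      simp only [if_neg h, Bool.or_eq_true, Bool.and_eq_true, beq_iff_eq]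
      tauto

-- Set.ofList is a sublist of its argument (dedup keeps first occurrences)
theorem pvOfList_sublist {α : Type} [BEq α] [LawfulBEq α] (xs : List α) :
    (PySem.Set.ofList xs).Sublist xs := by
  induction xs with
  | nil => simp [PySem.Set.ofList_nil]
  | cons x xs ih =>
    rw [PySem.Set.ofList_cons]
    refine List.Sublist.cons₂ x (List.Sublist.trans ?_ ih)
    show (PySem.Set.discard (PySem.Set.ofList xs) x).Sublist (PySem.Set.ofList xs)
    unfold PySem.Set.discard
    exact List.filter_sublist

theorem pvDiscard_not_mem (l : List String) (s : String) (h : s ∉ l) :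
    PySem.Set.discard l s = l := by
  unfold PySem.Set.discard
  refine List.filter_eq_self.mpr (fun x hx => ?_)
  simp only [Bool.not_eq_eq_eq_not, Bool.not_true, beq_eq_false_iff_ne]
  exact fun he => h (he ▸ hx)

theorem pvOfList_cons_dup (a : String) (l : List String) :
    PySem.Set.ofList (a :: a :: l) = PySem.Set.ofList (a :: l) := by
  show List.foldl PySem.Set.add PySem.Set.empty (a :: a :: l)
     = List.foldl PySem.Set.add PySem.Set.empty (a :: l)
  simp only [List.foldl_cons]
  congr 1
  simp [PySem.Set.add_eq_ite, PySem.Set.empty]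

theorem pvOfList_cons_run (s : String) (m dl : List String)
    (hm : ∀ x ∈ m, x = s) (hdl : s ∉ dl) :
    PySem.Set.ofList (s :: (m ++ dl)) = s :: PySem.Set.ofList dl := by
  induction m with
  | nil =>
    rw [List.nil_append, PySem.Set.ofList_cons]
    congr 1
    exact pvDiscard_not_mem _ _ (fun h => hdl ((PySem.Set.mem_ofList _ _).mp h))
  | cons y m ih =>
    have hys : y = s := hm y (List.mem_cons_self ..)
    subst hys
    rw [List.cons_append, pvOfList_cons_dup]
    exact ih (fun x hx => hm x (List.mem_cons.mpr (Or.inr hx)))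

-- B-side: the grouping loop on a lexicographically sorted pair list
theorem pvGroup_spec (pairs : List (String × String)) (hp : pairs.Pairwise pvLexLt) :
    pvGroup pairs = (PySem.Set.ofList (pairs.map Prod.fst)).map
      (fun s => (s, (pairs.filter (fun p => p.1 == s)).map Prod.snd)) := by
  induction pairs using pvGroup.induct with
  | case1 => simp [pvGroup, PySem.Set.ofList_nil]
  | case2 s r rest ih =>
    obtain ⟨hhead, hrest⟩ := List.pairwise_cons.mp hp
    set t := rest.takeWhile (fun p => p.1 == s) with ht
    set d := rest.dropWhile (fun p => p.1 == s) with hd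
    have hrestd : rest = t ++ d := (List.takeWhile_append_dropWhile ..).symm
    have hmt : ∀ x ∈ t, x.1 = s := fun x hx => by
      simpa using List.mem_takeWhile_imp hx
    have hmd : ∀ x ∈ d, s < x.1 := by
      intro x hx
      have hle : ∀ y ∈ rest, s ≤ y.1 := by
        intro y hy
        rcases hhead y hy with h1 | ⟨h1, _⟩
        · exact le_of_lt h1
        · exact le_of_eq h1
      cases hdd : d with
      | nil => rw [hdd] at hx; cases hx
      | cons h0 d' =>
        have hh0 : (fun p : String × String => p.1 == s) h0 = false := by
          have := List.head_dropWhile_not (fun p : String × String => p.1 == s) (l := rest)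
          rw [← hd] at this
          simpa [hdd] using this (by simp [hdd])
        have hh0ne : h0.1 ≠ s := by simpa using hh0
        have hh0mem : h0 ∈ rest := hrestd ▸ List.mem_append.mpr (Or.inr (hdd ▸ List.mem_cons_self ..))
        have hs0 : s < h0.1 := lt_of_le_of_ne (hle h0 hh0mem) (Ne.symm hh0ne)
        rw [hdd] at hx
        rcases List.mem_cons.mp hx with rfl | hx'
        · exact hs0
        · have hdp : d.Pairwise pvLexLt := hrest.sublist (List.dropWhile_sublist _)
          rw [hdd] at hdp
          obtain ⟨hh0all, _⟩ := List.pairwise_cons.mp hdp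
          rcases hh0all x hx' with h1 | ⟨h1, _⟩
          · exact lt_trans hs0 h1
          · exact h1 ▸ hs0
    have hfil : ((s, r) :: rest).filter (fun p => p.1 == s) = (s, r) :: t := by
      rw [List.filter_cons_of_pos (by simp), hrestd, List.filter_append]
      rw [List.filter_eq_self.mpr (fun x hx => by simpa using hmt x hx),
          List.filter_eq_nil_iff.mpr (fun x hx => by simpa using ne_of_gt (hmd x hx)), List.append_nil]
    have hset : PySem.Set.ofList (((s, r) :: rest).map Prod.fst)
        = s :: PySem.Set.ofList (d.map Prod.fst) := by
      rw [List.map_cons, hrestd, List.map_append]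
      exact pvOfList_cons_run s (t.map Prod.fst) (d.map Prod.fst)
        (fun x hx => by obtain ⟨y, hy, rfl⟩ := List.mem_map.mp hx; exact hmt y hy)
        (fun hmem => by obtain ⟨y, hy, hys⟩ := List.mem_map.mp hmem; exact ne_of_gt (hmd y hy) hys)
    rw [pvGroup, hset, List.map_cons, hfil, List.map_cons]
    congr 1
    rw [ih (hrest.sublist (List.dropWhile_sublist _))]
    refine List.map_congr_left (fun s' hs' => ?_)
    have hs's : s < s' := by
      obtain ⟨y, hy, rfl⟩ := List.mem_map.mp ((PySem.Set.mem_ofList _ _).mp hs')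
      exact hmd y hy
    have hfil2 : ((s, r) :: rest).filter (fun p => p.1 == s') = d.filter (fun p => p.1 == s') := by
      rw [List.filter_cons_of_neg (by simpa using (ne_of_gt hs's).symm), hrestd, List.filter_append]
      rw [List.filter_eq_nil_iff.mpr (fun x hx => by
            simpa using fun he => ne_of_gt hs's (hmt x hx ▸ he).symm), List.nil_append]
    rw [hfil2]

-- B-side: the merge loop is a membership-test fold when both lists are sorted
theorem pvFillRow_eq_foldl (regions hv : List String) (row : PySem.Dict String String)
    (hreg : regions.Pairwise (· < ·)) (hhv : hv.Pairwise (· < ·))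
    (hsub : ∀ h ∈ hv, h ∈ regions) :
    pvFillRow regions hv row
      = regions.foldl (fun d r => d.insert r (if r ∈ hv then "✓" else "✗")) row := by
  induction regions generalizing hv row with
  | nil => cases hv <;> rfl
  | cons r rs ih =>
    obtain ⟨hr, hrs⟩ := List.pairwise_cons.mp hreg
    cases hv with
    | nil =>
      simp only [pvFillRow, List.foldl_cons, List.not_mem_nil, if_false]
      exact ih [] _ hrs List.Pairwise.nil (by simp)
    | cons h hs =>
      obtain ⟨hh, hhs⟩ := List.pairwise_cons.mp hhv
      by_cases he : h = r
      · subst he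
        simp only [pvFillRow, List.foldl_cons, List.mem_cons, true_or, if_true]
        rw [ih hs _ hrs hhs ?sub]
        case sub =>
          intro x hx
          have hx' : x ∈ h :: rs := hsub x (List.mem_cons.mpr (Or.inr hx))
          rcases List.mem_cons.mp hx' with rfl | h2
          · exact absurd (hh x hx) (lt_irrefl x)
          · exact h2
        refine PySem.List.foldl_congr_mem _ _ _ _ (fun d x hx => ?_)
        have hrx : h < x := hr x hx
        have hcond : (x = h ∨ x ∈ hs) ↔ (x ∈ hs) :=
          or_iff_right (fun he2 => absurd hrx (he2 ▸ lt_irrefl x))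
        simp only [hcond]
      · have hnr : r ∉ h :: hs := by
          intro hmem
          rcases List.mem_cons.mp hmem with rfl | hmem'
          · exact he rfl
          · have h1 : h < r := hh r hmem'
            have h2 : h ∈ r :: rs := hsub h (List.mem_cons_self ..)
            rcases List.mem_cons.mp h2 with rfl | h3
            · exact he rfl
            · exact absurd (hr h h3) (asymm h1)
        simp only [pvFillRow, if_neg he, List.foldl_cons]
        rw [if_neg hnr]
        refine ih (h :: hs) _ hrs hhv (fun x hx => ?_)
        have hx' : x ∈ r :: rs := hsub x hx
        rcases List.mem_cons.mp hx' with rfl | h2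
        · exact absurd hx hnr
        · exact h2

-- ===== VERDICT (by name: the statement is the Claim_ definition above) =====
theorem generate_service_matrix_py_spec : Claim_equal_generate_service_matrix_py := by
  unfold Claim_equal_generate_service_matrix_py
  intro data _hdom _hpre
  unfold Spec_generate_service_matrix_py
  cases data with
  | nil => rfl
  | cons first tail =>
    unfold generate_service_matrix_py generate_service_matrix_py_alt
    dsimp only
    by_cases hg : (!pvHasKey first "Service Name" || !pvHasKey first "Region Code") = true
    · rw [if_pos hg, if_pos hg]
    · rw [if_neg hg, if_neg hg]
      have hpw : (pvPairs (first :: tail)).Pairwise pvLexLt := pvPairs_pairwise (first :: tail)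
      -- membership of first components
      have hmfst : ∀ x, x ∈ (pvPairs (first :: tail)).map Prod.fst
          ↔ x ∈ (first :: tail).map (fun row => pvRowGet row "Service Name") := by
        intro x
        have hLfst : ((first :: tail).map pvPairFun).map Prod.fst
            = (first :: tail).map (fun row => pvRowGet row "Service Name") := by
          rw [List.map_map]; rfl
        rw [← hLfst]
        constructor
        · intro hx
          obtain ⟨p, hp, rfl⟩ := List.mem_map.mp hx
          exact List.mem_map.mpr ⟨p, (pvPairs_mem _ p).mp hp, rfl⟩
        · intro hx
          obtain ⟨p, hp, rfl⟩ := List.mem_map.mp hx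
          exact List.mem_map.mpr ⟨p, (pvPairs_mem _ p).mpr hp, rfl⟩
      -- membership of second components
      have hmsnd : ∀ x, x ∈ (pvPairs (first :: tail)).map Prod.snd
          ↔ x ∈ (first :: tail).map (fun row => pvRowGet row "Region Code") := by
        intro x
        have hLsnd : ((first :: tail).map pvPairFun).map Prod.snd
            = (first :: tail).map (fun row => pvRowGet row "Region Code") := by
          rw [List.map_map]; rfl
        rw [← hLsnd]
        constructor
        · intro hx
          obtain ⟨p, hp, rfl⟩ := List.mem_map.mp hx
          exact List.mem_map.mpr ⟨p, (pvPairs_mem _ p).mp hp, rfl⟩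
        · intro hx
          obtain ⟨p, hp, rfl⟩ := List.mem_map.mp hx
          exact List.mem_map.mpr ⟨p, (pvPairs_mem _ p).mpr hp, rfl⟩
      -- B's region list is A's region list
      have hreg_eq : pvRegionsB (pvPairs (first :: tail)) = pvRegions (first :: tail) := by
        refine PySem.List.sorted_eq_sorted_of_perm _ _ _ (fun a b h => h) ?_
        refine (List.perm_ext_iff_of_nodup (PySem.Set.nodup_ofList _) (PySem.Set.nodup_ofList _)).mpr
          (fun a => ?_)
        rw [PySem.Set.mem_ofList, PySem.Set.mem_ofList, hmsnd a]
      -- A's service list is the deduped first components of the sorted pairs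
      have hserv_eq : pvServices (first :: tail)
          = PySem.Set.ofList ((pvPairs (first :: tail)).map Prod.fst) := by
        refine PySem.List.sorted_eq_of_perm_of_pairwise_lt _ _ _ ?_ ?_
        · refine (List.perm_ext_iff_of_nodup (PySem.Set.nodup_ofList _) (PySem.Set.nodup_ofList _)).mpr
            (fun a => ?_)
          rw [PySem.Set.mem_ofList, PySem.Set.mem_ofList, hmfst a]
        · have h1 : ((pvPairs (first :: tail)).map Prod.fst).Pairwise (· ≤ ·) := by
            refine List.pairwise_map.mpr (hpw.imp ?_)
            rintro a b (h | ⟨h, _⟩)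
            · exact le_of_lt h
            · exact le_of_eq h
          have h2 := h1.sublist (pvOfList_sublist _)
          have h3 : (PySem.Set.ofList ((pvPairs (first :: tail)).map Prod.fst)).Nodup :=
            PySem.Set.nodup_ofList _
          exact (h2.and h3).imp (fun {a b} ⟨hle, hne⟩ => lt_of_le_of_ne hle hne)
      -- rewrite A to a map over services, B to a map over the same list
      rw [PySem.List.foldl_append_singleton_eq_map, List.nil_append,
        pvGroup_spec _ hpw, List.map_map, hserv_eq]
      refine List.map_congr_left (fun s _hs => ?_)
      dsimp only [Function.comp]
      -- per-service region list of B
      have hhitmem : ∀ r, r ∈ ((pvPairs (first :: tail)).filter (fun p => p.1 == s)).map Prod.snd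
          ↔ pvHit (first :: tail) s r = true := by
        intro r
        constructor
        · intro hmemmap
          obtain ⟨p, hp, h2⟩ := List.mem_map.mp hmemmap
          obtain ⟨hp1, hp2⟩ := List.mem_filter.mp hp
          have hpe : p = (s, r) := Prod.ext (by simpa using hp2) h2
          exact (pvHit_iff ..).mpr ((pvPairs_mem _ _).mp (hpe ▸ hp1))
        · intro hhit
          exact List.mem_map.mpr ⟨(s, r),
            List.mem_filter.mpr ⟨(pvPairs_mem _ _).mpr ((pvHit_iff ..).mp hhit), by simp⟩, rfl⟩
      -- B's merge loop as a membership fold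
      rw [hreg_eq, pvFillRow_eq_foldl _ _ _ ?hregpw ?hhvpw ?hsub]
      case hregpw => exact PySem.List.sorted_ofList_pairwise_lt _
      case hhvpw =>
        refine List.pairwise_map.mpr ?_
        have hf : ((pvPairs (first :: tail)).filter (fun p => p.1 == s)).Pairwise pvLexLt :=
          hpw.filter _
        refine hf.imp_of_mem ?_
        intro a b ha hb hab
        have ha1 : a.1 = s := by simpa using (List.mem_filter.mp ha).2
        have hb1 : b.1 = s := by simpa using (List.mem_filter.mp hb).2
        rcases hab with h | ⟨_, h⟩
        · exact absurd h (by rw [ha1, hb1]; exact lt_irrefl s)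
        · exact h
      case hsub =>
        intro r hr
        have : r ∈ (pvPairs (first :: tail)).map Prod.snd := by
          obtain ⟨p, hp, hps⟩ := List.mem_map.mp hr
          exact List.mem_map.mpr ⟨p, (List.mem_filter.mp hp).1, hps⟩
        rw [hmsnd r] at this
        rw [pvRegions, PySem.List.mem_sorted, PySem.Set.mem_ofList]
        exact this
      -- the two folds build the same row
      refine congrArg PySem.Dict.items ?_
      refine PySem.List.foldl_congr_mem _ _ _ _ (fun d r _hr => ?_)
      have hcond : (PySem.Set.contains
            (((first :: tail).foldl (fun m row =>
              let s' := pvRowGet row "Service Name"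
              let r' := pvRowGet row "Region Code"
              let m' := if m.contains s' then m else m.insert s' PySem.Set.empty
              m'.insert s' (PySem.Set.add (m'.getD s' PySem.Set.empty) r')) PySem.Dict.empty).getD s PySem.Set.empty) r = true)
          ↔ (r ∈ ((pvPairs (first :: tail)).filter (fun p => p.1 == s)).map Prod.snd) := by
        rw [hhitmem r, PySem.Set.contains_iff, srmap_getD_mem]
        constructor
        · rintro (h | h)
          · simp [PySem.Dict.empty, PySem.Dict.getD, PySem.Dict.get?, PySem.Set.empty] at h
          · exact h
        · exact Or.inr
      simp only [hcond]
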